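-- pv_equiv track=rewrite | github.com/Ingomancer/AoC2021 | squid/bingo.py | _make_boards
-- ===== SOURCE A (Python) =====
-- def _make_boards(input):
--     boards = []
--     board = []
--     row = 0
--     for line in input:
--         if line != "":
--             board.append([])
--             for number in map(int, line.split()):
--                 board[row].append((number, False))
--             row += 1
--         else:
--             boards.append(board)
--             board = []
--             row = 0
--     boards.append(board)
--     return boards
-- ===== SOURCE B (Python) =====
-- def _make_boards(input):
--     blocks = [[]]
--     for line in list(input):
--         if line == "":
--             blocks.append([])
--         else:
--             blocks[-1].append(line)
--     return [[[(int(n), False) for n in l.split()] for l in block] for block in blocks]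
-- ===== Notes on version B (the rewrite author's own statement) =====
-- stated objective: simpler
-- what changed: B first groups the lines into blocks split on empty lines, then parses every block with a nested comprehension, instead of A's single interleaved pass that maintains boards/board/row and appends into board[row]; same O(n) cost.
import Mathlib
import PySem

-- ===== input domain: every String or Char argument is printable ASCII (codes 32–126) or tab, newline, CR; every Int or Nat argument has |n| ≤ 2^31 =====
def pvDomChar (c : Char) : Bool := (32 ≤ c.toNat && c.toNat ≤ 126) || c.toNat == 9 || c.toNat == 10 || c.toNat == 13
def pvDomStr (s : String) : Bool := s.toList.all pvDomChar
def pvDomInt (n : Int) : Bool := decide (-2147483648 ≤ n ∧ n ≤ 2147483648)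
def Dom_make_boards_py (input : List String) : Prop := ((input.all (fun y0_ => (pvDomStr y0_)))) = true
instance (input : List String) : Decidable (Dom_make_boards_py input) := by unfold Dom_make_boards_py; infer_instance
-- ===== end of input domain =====

-- B separates grouping from parsing (two passes) instead of A's single interleaved pass
-- with a row counter; same return value; objective: simpler decomposition, no speed claim.

-- ===== PORT A =====
-- int(tok): none = ValueError, excluded by Pre_; .getD 0 is never reached inside Pre_.
def pvInt (tok : String) : Int := (PySem.Int.ofStr? tok).getD 0

-- inner loop: for number in map(int, line.split()): board[row].append((number, False))
def pvInner (line : String) (board : List (List (Int × Bool))) (row : Nat) :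
    List (List (Int × Bool)) :=
  (PySem.Str.split₀ line).foldl
    (fun b tok => b.modify row (fun r => r ++ [(pvInt tok, false)])) board

def make_boards_py (input : List String) : List (List (List (Int × Bool))) :=
  let st := input.foldl
    (fun (st : List (List (List (Int × Bool))) × List (List (Int × Bool)) × Nat) line =>
      let (boards, board, row) := st
      if line ≠ "" then
        (boards, pvInner line (board ++ [[]]) row, row + 1)
      else
        (boards ++ [board], [], 0))
    ([], [], 0)
  st.1 ++ [st.2.1]

-- ===== PORT B =====
def pvParseLine (l : String) : List (Int × Bool) :=
  (PySem.Str.split₀ l).map (fun n => (pvInt n, false))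

def make_boards_py_alt (input : List String) : List (List (List (Int × Bool))) :=
  let blocks := input.foldl
    (fun (bs : List (List String)) line =>
      if line = "" then bs ++ [[]]
      else bs.dropLast ++ [bs.getLast! ++ [line]])
    [[]]
  blocks.map (fun block => block.map pvParseLine)

-- ===== PRECONDITION & SPEC =====
-- Pre_ excludes exactly the inputs where int() raises ValueError on some token of a line.
def Pre_make_boards_py (input : List String) : Prop :=
  ∀ l ∈ input, ∀ t ∈ PySem.Str.split₀ l, (PySem.Int.ofStr? t).isSome
instance (input : List String) : Decidable (Pre_make_boards_py input) := by
  unfold Pre_make_boards_py; infer_instance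

def pvWitness_make_boards_py : List String := ["1 2", "", "3 4"]

def Spec_make_boards_py (input : List String) (out : List (List (List (Int × Bool)))) : Prop := out = make_boards_py_alt input
instance (input : List String) (out : List (List (List (Int × Bool)))) : Decidable (Spec_make_boards_py input out) := by unfold Spec_make_boards_py; infer_instance

-- ===== CLAIM (what is proved, stated in full; the proofs are below) =====
def Claim_equal_make_boards_py : Prop := ∀ (input : List String), Dom_make_boards_py input → Pre_make_boards_py input → Spec_make_boards_py input (make_boards_py input)

-- ===== LEMMAS AND PROOFS =====

-- modify at the last index of board ++ [acc]
lemma modify_last {α : Type} (board : List α) (acc : α) (f : α → α) :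
    (board ++ [acc]).modify board.length f = board ++ [f acc] := by
  induction board with
  | nil => simp
  | cons x xs ih => simpa using ih

lemma pvInner_fold (ts : List String) (board : List (List (Int × Bool)))
    (acc : List (Int × Bool)) :
    ts.foldl (fun b tok => b.modify board.length (fun r => r ++ [(pvInt tok, false)]))
      (board ++ [acc]) = board ++ [acc ++ ts.map (fun n => (pvInt n, false))] := by
  induction ts generalizing acc with
  | nil => simp
  | cons t ts ih => simp only [List.foldl_cons, modify_last, ih, List.map_cons,
      List.append_assoc, List.cons_append, List.nil_append]

lemma pvInner_eq (line : String) (board : List (List (Int × Bool))) :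
    pvInner line (board ++ [[]]) board.length = board ++ [pvParseLine line] := by
  unfold pvInner pvParseLine
  simpa using pvInner_fold (PySem.Str.split₀ line) board []

-- the main loop invariant: A's (boards, board, row) corresponds to B's blocks ds ++ [c]
lemma loop_eq (input : List String) (ds : List (List String)) (c : List String) :
    (input.foldl
      (fun (st : List (List (List (Int × Bool))) × List (List (Int × Bool)) × Nat) line =>
        let (boards, board, row) := st
        if line ≠ "" then
          (boards, pvInner line (board ++ [[]]) row, row + 1)
        else
          (boards ++ [board], [], 0))
      (ds.map (fun b => b.map pvParseLine), c.map pvParseLine, c.length)).1 ++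
      [(input.foldl
      (fun (st : List (List (List (Int × Bool))) × List (List (Int × Bool)) × Nat) line =>
        let (boards, board, row) := st
        if line ≠ "" then
          (boards, pvInner line (board ++ [[]]) row, row + 1)
        else
          (boards ++ [board], [], 0))
      (ds.map (fun b => b.map pvParseLine), c.map pvParseLine, c.length)).2.1] =
    (input.foldl
      (fun (bs : List (List String)) line =>
        if line = "" then bs ++ [[]]
        else bs.dropLast ++ [bs.getLast! ++ [line]])
      (ds ++ [c])).map (fun block => block.map pvParseLine) := by
  induction input generalizing ds c with
  | nil => simp
  | cons line rest ih =>
      by_cases h : line = ""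
      · subst h
        simpa using ih (ds ++ [c]) []
      · simp only [List.foldl_cons]
        rw [if_pos h, if_neg h]
        have hgl : (ds ++ [c]).getLast! = c := by
          induction ds with
          | nil => rfl
          | cons d ds ihd =>
              rw [List.cons_append]
              cases hds : ds ++ [c] with
              | nil => simp at hds
              | cons a as => rw [← hds] at *; simp [List.getLast!] at ihd ⊢
        have hdl : (ds ++ [c]).dropLast = ds := by simp
        rw [hgl, hdl, show c.length = (List.map pvParseLine c).length from (by simp), pvInner_eq]
        have := ih ds (c ++ [line])
        simpa using this

-- ===== VERDICT (by name: the statement is the Claim_ definition above) =====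
theorem make_boards_py_spec : Claim_equal_make_boards_py := by
  intro input _ _
  unfold Spec_make_boards_py make_boards_py make_boards_py_alt
  have := loop_eq input [] []
  simpa using this
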